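-- pv_equiv track=rewrite | github.com/sama-shah/romi | menstrual_prediction_algorithm/data_processing_utils.py | create_generated_labels
-- ===== SOURCE A (Python) =====
-- from typing import List, Dict, Iterable, Tuple, Set, Optional
--
-- def create_generated_labels(
--     num_data_points: int,
--     ovulation: Set[int],
--     fertility: Set[int],
--     spike: Set[int],
--     period: Set[int]
-- ) -> List[str]:
--     """
--     Generate label strings for each time index based on membership
--     in different physiological phase index sets.
--
--     Priority order:
--         ovulation → fertile → luteal → period → follicular
--
--     Parameters
--     ----------
--     num_data_points : int
--         Number of data points to label.
--     ovulation, fertility, spike, period : set of int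
--         Sets of indices for each physiological phase.
--
--     Returns
--     -------
--     List[str]
--         A label per data point.
--     """
--     labels = []
--
--     for i in range(num_data_points):
--         if i in ovulation:
--             labels.append("ovulation")
--         elif i in fertility:
--             labels.append("fertile")
--         elif i in spike:
--             labels.append("luteal")
--         elif i in period:
--             labels.append("period")
--         else:
--             labels.append("follicular")
--
--     return labels
-- ===== SOURCE B (Python) =====
-- def create_generated_labels(num_data_points, ovulation, fertility, spike, period):
--     labels = ["follicular"] * num_data_points
--     for phase_set, label in ((period, "period"), (spike, "luteal"),
--                              (fertility, "fertile"), (ovulation, "ovulation")):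
--         for i in phase_set:
--             if 0 <= i < num_data_points:
--                 labels[i] = label
--     return labels
-- ===== Notes on version B (the rewrite author's own statement) =====
-- stated objective: alternative
-- what changed: Instead of scanning the index range and testing each index against every set in priority order, B pre-fills the list with 'follicular' and paints the phase sets over it in reverse priority order, so higher-priority labels overwrite lower ones.
import Mathlib
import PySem

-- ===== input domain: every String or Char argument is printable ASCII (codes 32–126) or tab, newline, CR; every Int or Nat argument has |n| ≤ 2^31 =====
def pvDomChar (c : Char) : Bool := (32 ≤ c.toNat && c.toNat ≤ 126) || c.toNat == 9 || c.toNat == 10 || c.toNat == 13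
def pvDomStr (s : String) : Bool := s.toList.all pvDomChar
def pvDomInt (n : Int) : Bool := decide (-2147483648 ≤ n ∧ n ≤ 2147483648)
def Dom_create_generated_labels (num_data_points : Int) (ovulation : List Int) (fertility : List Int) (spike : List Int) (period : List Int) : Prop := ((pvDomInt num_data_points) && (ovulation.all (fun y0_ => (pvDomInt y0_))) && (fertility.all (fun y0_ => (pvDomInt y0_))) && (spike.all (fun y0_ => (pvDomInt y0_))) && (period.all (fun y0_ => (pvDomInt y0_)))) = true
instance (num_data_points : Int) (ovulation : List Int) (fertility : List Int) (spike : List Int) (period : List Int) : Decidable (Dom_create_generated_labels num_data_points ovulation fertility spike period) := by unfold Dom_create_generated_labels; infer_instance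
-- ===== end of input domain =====

-- B replaces A's per-index priority scan by pre-filling 'follicular' and painting the
-- phase sets over it in reverse priority order (alternative decomposition, same cost class).

-- ===== PORT A =====
-- for i in range(num_data_points): append the label chosen by the if/elif chain
def create_generated_labels (num_data_points : Int) (ovulation : List Int) (fertility : List Int) (spike : List Int) (period : List Int) : List String :=
  (PySem.List.pyRange 0 num_data_points 1).foldl
    (fun labels i =>
      labels ++ [if ovulation.contains i then "ovulation"
                 else if fertility.contains i then "fertile"
                 else if spike.contains i then "luteal"
                 else if period.contains i then "period"
                 else "follicular"]) []

-- ===== PORT B =====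
-- for i in phase_set: if 0 <= i < num_data_points: labels[i] = label
def pvPaint (num_data_points : Int) (labels : List String) (phase_set : List Int) (label : String) : List String :=
  phase_set.foldl
    (fun acc i => if 0 ≤ i ∧ i < num_data_points then acc.set i.toNat label else acc)
    labels

def create_generated_labels_alt (num_data_points : Int) (ovulation : List Int) (fertility : List Int) (spike : List Int) (period : List Int) : List String :=
  pvPaint num_data_points
    (pvPaint num_data_points
      (pvPaint num_data_points
        (pvPaint num_data_points
          (List.replicate num_data_points.toNat "follicular")
          period "period")
        spike "luteal")
      fertility "fertile")
    ovulation "ovulation"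

-- ===== PRECONDITION & SPEC =====
def Spec_create_generated_labels (num_data_points : Int) (ovulation : List Int) (fertility : List Int) (spike : List Int) (period : List Int) (out : List String) : Prop := out = create_generated_labels_alt num_data_points ovulation fertility spike period
instance (num_data_points : Int) (ovulation : List Int) (fertility : List Int) (spike : List Int) (period : List Int) (out : List String) : Decidable (Spec_create_generated_labels num_data_points ovulation fertility spike period out) := by unfold Spec_create_generated_labels; infer_instance

-- ===== CLAIM (what is proved, stated in full; the proofs are below) =====
def Claim_equal_create_generated_labels : Prop := ∀ (num_data_points : Int) (ovulation : List Int) (fertility : List Int) (spike : List Int) (period : List Int), Dom_create_generated_labels num_data_points ovulation fertility spike period → Spec_create_generated_labels num_data_points ovulation fertility spike period (create_generated_labels num_data_points ovulation fertility spike period)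

-- ===== LEMMAS AND PROOFS =====

theorem pvPaint_length (n : Int) (L : List String) (s : List Int) (lab : String) :
    (pvPaint n L s lab).length = L.length := by
  induction s generalizing L with
  | nil => rfl
  | cons i s ih =>
    simp only [pvPaint, List.foldl_cons] at *
    rw [ih]
    split <;> simp

theorem pvPaint_getElem? (n : Int) (L : List String) (hL : L.length = n.toNat)
    (s : List Int) (lab : String) (j : Nat) :
    (pvPaint n L s lab)[j]? = if s.contains (j : Int) ∧ (j : Int) < n then some lab else L[j]? := by
  induction s generalizing L with
  | nil => simp [pvPaint]
  | cons i s ih =>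
    simp only [pvPaint, List.foldl_cons] at *
    set L' := if 0 ≤ i ∧ i < n then L.set i.toNat lab else L with hL'
    have hlen : L'.length = n.toNat := by rw [hL']; split <;> simp [hL]
    rw [ih L' hlen]
    by_cases hs : s.contains (j : Int) = true ∧ (j : Int) < n
    · have hc : (i :: s).contains (j : Int) = true ∧ (j : Int) < n := by
        refine ⟨?_, hs.2⟩
        simp only [List.contains_cons, Bool.or_eq_true]
        right
        exact hs.1
      rw [if_pos hs, if_pos hc]
    · rw [if_neg hs]
      by_cases hij : i = (j : Int)
      · by_cases hjn : i < n
        · have h0 : (0 : Int) ≤ i := by rw [hij]; positivity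
          have hset : L' = L.set i.toNat lab := by rw [hL']; simp [h0, hjn]
          have hjl : j < L.length := by rw [hL]; omega
          have hnat : i.toNat = j := by omega
          have hc : (i :: s).contains (j : Int) = true ∧ (j : Int) < n := by
            refine ⟨?_, by omega⟩
            simp [hij]
          rw [hset, hnat, if_pos hc]
          simp [hjl]
        · have hng : ¬ (0 ≤ i ∧ i < n) := by omega
          have hLL : L' = L := by rw [hL']; simp [hng]
          have hnc : ¬ ((i :: s).contains (j : Int) = true ∧ (j : Int) < n) := by
            rintro ⟨-, h2⟩; omega
          rw [hLL, if_neg hnc]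
      · have hL'j : L'[j]? = L[j]? := by
          rw [hL']
          split
          next h =>
            have hne : i.toNat ≠ j := by omega
            simp [hne]
          next => rfl
        have hnc : ¬ ((i :: s).contains (j : Int) = true ∧ (j : Int) < n) := by
          rintro ⟨h1, h2⟩
          simp only [List.contains_cons, Bool.or_eq_true, beq_iff_eq] at h1
          rcases h1 with h | h
          · exact hij h.symm
          · exact hs ⟨by simpa using h, h2⟩
        rw [hL'j, if_neg hnc]

theorem create_generated_labels_spec : Claim_equal_create_generated_labels := by
  intro n ov fe sp pe _
  unfold Spec_create_generated_labels
  unfold create_generated_labels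
  rw [PySem.List.foldl_append_singleton_eq_map, List.nil_append]
  set f : Int → String := fun i =>
    if ov.contains i then "ovulation"
    else if fe.contains i then "fertile"
    else if sp.contains i then "luteal"
    else if pe.contains i then "period"
    else "follicular" with hf
  -- lengths
  have hrep : (List.replicate n.toNat "follicular").length = n.toNat := by simp
  have h1 := pvPaint_length n (List.replicate n.toNat "follicular") pe "period"
  have h2 := pvPaint_length n (pvPaint n (List.replicate n.toNat "follicular") pe "period") sp "luteal"
  have h3 := pvPaint_length n (pvPaint n (pvPaint n (List.replicate n.toNat "follicular") pe "period") sp "luteal") fe "fertile"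
  apply List.ext_getElem?
  intro j
  by_cases hj : j < n.toNat
  · have hjn : (j : Int) < n := by omega
    have hget : ((PySem.List.pyRange 0 n 1).map f)[j]? = some (f (j : Int)) := by
      rw [PySem.List.pyRange_one, List.map_map]
      have hj2 : j < (n - 0).toNat := by omega
      rw [List.getElem?_map, List.getElem?_range hj2]
      simp
    rw [hget]
    unfold create_generated_labels_alt
    rw [pvPaint_getElem? n _ (by rw [h3, h2, h1, hrep]) ov "ovulation" j,
        pvPaint_getElem? n _ (by rw [h2, h1, hrep]) fe "fertile" j,
        pvPaint_getElem? n _ (by rw [h1, hrep]) sp "luteal" j,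
        pvPaint_getElem? n _ hrep pe "period" j]
    have hrepj : (List.replicate n.toNat "follicular")[j]? = some "follicular" := by
      simp [hj]
    rw [hrepj, hf]
    simp only [hjn, and_true]
    split_ifs <;> rfl
  · have hA : ((PySem.List.pyRange 0 n 1).map f)[j]? = none := by
      apply List.getElem?_eq_none
      simp [PySem.List.length_pyRange_one]
      omega
    have hB : (create_generated_labels_alt n ov fe sp pe)[j]? = none := by
      apply List.getElem?_eq_none
      unfold create_generated_labels_alt
      rw [pvPaint_length, pvPaint_length, pvPaint_length, pvPaint_length, hrep]
      omega
    rw [hA, hB]
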